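-- pv_equiv track=rewrite | github.com/thienphucope/chessBot | engine/simple_eval.py | _get_adjacent_squares
-- ===== SOURCE A (Python) =====
-- def _get_adjacent_squares(sq: int) -> list[int]:
--     """Get all adjacent squares (8 directions) to a given square"""
--     row, col = sq // 8, sq % 8
--     adjacent = []
--     for dr in [-1, 0, 1]:
--         for dc in [-1, 0, 1]:
--             if dr == 0 and dc == 0:
--                 continue
--             nr, nc = row + dr, col + dc
--             if 0 <= nr < 8 and 0 <= nc < 8:
--                 adjacent.append(nr * 8 + nc)
--     return adjacent
-- ===== SOURCE B (Python) =====
-- def _get_adjacent_squares(sq: int) -> list[int]: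
--     """Get all adjacent squares (8 directions) to a given square"""
--     row, col = divmod(sq, 8)
--     return [s for s in range(64)
--             if max(abs(s // 8 - row), abs(s % 8 - col)) == 1]
-- ===== Notes on version B (the rewrite author's own statement) =====
-- stated objective: alternative
-- what changed: B replaces the three-by-three offset-probe loop with an ascending scan of the whole board, keeping exactly the squares at Chebyshev distance one from (sq // 8, sq % 8).
import Mathlib
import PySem

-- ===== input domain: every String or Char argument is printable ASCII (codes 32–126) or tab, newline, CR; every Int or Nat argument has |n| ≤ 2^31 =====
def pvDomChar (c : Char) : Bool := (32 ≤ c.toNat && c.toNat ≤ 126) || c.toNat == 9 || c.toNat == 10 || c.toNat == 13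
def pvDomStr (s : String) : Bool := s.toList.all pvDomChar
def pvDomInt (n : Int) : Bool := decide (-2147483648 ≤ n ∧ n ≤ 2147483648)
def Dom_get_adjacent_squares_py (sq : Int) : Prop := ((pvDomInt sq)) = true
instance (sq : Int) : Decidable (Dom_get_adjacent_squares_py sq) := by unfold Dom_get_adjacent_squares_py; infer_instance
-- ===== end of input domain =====

-- B replaces A's offset-probe loop by an ascending whole-board scan
-- filtered by Chebyshev adjacency; equal return value proved on the whole domain.

-- ===== PORT A =====
def get_adjacent_squares_py (sq : Int) : List Int :=
  let row := PySem.Int.floordiv sq 8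
  let col := PySem.Int.mod sq 8
  ([-1, 0, 1] : List Int).foldl (fun acc dr =>
    ([-1, 0, 1] : List Int).foldl (fun acc dc =>
      if dr = 0 ∧ dc = 0 then acc
      else
        let nr := row + dr
        let nc := col + dc
        if 0 ≤ nr ∧ nr < 8 ∧ 0 ≤ nc ∧ nc < 8 then acc ++ [nr * 8 + nc] else acc)
      acc) []

-- ===== PORT B =====
def get_adjacent_squares_py_alt (sq : Int) : List Int :=
  let row := PySem.Int.floordiv sq 8
  let col := PySem.Int.mod sq 8
  (PySem.List.pyRange 0 64 1).filter (fun s =>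
    max (PySem.Int.floordiv s 8 - row).natAbs ((PySem.Int.mod s 8) - col).natAbs == 1)

-- ===== PRECONDITION & SPEC =====
def Spec_get_adjacent_squares_py (sq : Int) (out : List Int) : Prop := out = get_adjacent_squares_py_alt sq
instance (sq : Int) (out : List Int) : Decidable (Spec_get_adjacent_squares_py sq out) := by unfold Spec_get_adjacent_squares_py; infer_instance

-- ===== CLAIM (what is proved, stated in full; the proofs are below) =====
def Claim_equal_get_adjacent_squares_py : Prop := ∀ (sq : Int), Dom_get_adjacent_squares_py sq → Spec_get_adjacent_squares_py sq (get_adjacent_squares_py sq)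

-- ===== LEMMAS AND PROOFS =====

-- the two loop bodies as functions of (row, col) only (each port is definitionally core_ applied to sq // 8, sq % 8)
def coreA (row col : Int) : List Int :=
  ([-1, 0, 1] : List Int).foldl (fun acc dr =>
    ([-1, 0, 1] : List Int).foldl (fun acc dc =>
      if dr = 0 ∧ dc = 0 then acc
      else
        let nr := row + dr
        let nc := col + dc
        if 0 ≤ nr ∧ nr < 8 ∧ 0 ≤ nc ∧ nc < 8 then acc ++ [nr * 8 + nc] else acc)
      acc) []

def coreB (row col : Int) : List Int :=
  (PySem.List.pyRange 0 64 1).filter (fun s =>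
    max (PySem.Int.floordiv s 8 - row).natAbs ((PySem.Int.mod s 8) - col).natAbs == 1)

lemma foldl_fixed_mem {α β : Type} {f : α → β → α} {l : List β} (h : ∀ x ∈ l, ∀ a, f a x = a) : ∀ a, l.foldl f a = a := by
  induction l with
  | nil => intro a; rfl
  | cons y t ih =>
    intro a
    rw [List.foldl_cons, h y (List.mem_cons_self) a]
    exact ih (fun x hx a => h x (List.mem_cons_of_mem y hx) a) a

lemma coreA_empty (row col : Int) (h : row < -1 ∨ 8 < row) : coreA row col = [] := by
  unfold coreA
  refine foldl_fixed_mem ?_ []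
  intro dr hdr acc
  refine foldl_fixed_mem ?_ acc
  intro dc hdc acc2
  simp only [List.mem_cons, List.not_mem_nil, or_false] at hdr hdc
  dsimp only
  split_ifs <;> first | rfl | omega

lemma coreB_empty (row col : Int) (h : row < -1 ∨ 8 < row) : coreB row col = [] := by
  apply List.filter_eq_nil_iff.mpr
  intro s hs
  have hb := (PySem.List.mem_pyRange_one).mp hs
  rw [PySem.Int.floordiv_eq_ediv_of_pos (by norm_num), PySem.Int.mod_eq_emod_of_pos (by norm_num)]
  simp only [beq_iff_eq, Nat.max_def]
  split_ifs <;> omega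

set_option maxHeartbeats 1000000 in
lemma core_eq_mid : ∀ row ∈ Finset.Icc (-1:Int) 8, ∀ col ∈ Finset.Icc (0:Int) 7, coreA row col = coreB row col := by decide

lemma core_eq (row col : Int) (h0 : 0 ≤ col) (h1 : col < 8) : coreA row col = coreB row col := by
  by_cases hlo : row < -1
  · rw [coreA_empty _ _ (Or.inl hlo), coreB_empty _ _ (Or.inl hlo)]
  · by_cases hhi : 8 < row
    · rw [coreA_empty _ _ (Or.inr hhi), coreB_empty _ _ (Or.inr hhi)]
    · exact core_eq_mid row (Finset.mem_Icc.mpr ⟨by omega, by omega⟩) col (Finset.mem_Icc.mpr ⟨h0, by omega⟩)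

-- ===== VERDICT (by name: the statement is the Claim_ definition above) =====
theorem get_adjacent_squares_py_spec : Claim_equal_get_adjacent_squares_py := by
  intro sq _
  show get_adjacent_squares_py sq = get_adjacent_squares_py_alt sq
  exact core_eq (PySem.Int.floordiv sq 8) (PySem.Int.mod sq 8)
    (PySem.Int.mod_nonneg sq (by norm_num)) (PySem.Int.mod_lt sq (by norm_num))
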